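-- pv_equiv track=rewrite | github.com/Kenzie-Academy-Brasil-Developers/q3-sprint1-conjuntos-laudemirjunior | main.py | popular_only_spanish_fruits
-- ===== SOURCE A (Python) =====
-- def popular_only_spanish_fruits(popular_fruits, spanish_fruits, japanese_fruits, brazilian_fruits):
--     list = []
--     for i in popular_fruits:
--         for j in spanish_fruits:
--             for k in japanese_fruits:
--                 for l in brazilian_fruits:
--                     if i == j == k == l:
--                         list.append(i)
--     return list
-- ===== SOURCE B (Python) =====
-- def popular_only_spanish_fruits(popular_fruits, spanish_fruits, japanese_fruits, brazilian_fruits):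
--     def counter(xs):
--         c = {}
--         for x in xs:
--             c[x] = c.get(x, 0) + 1
--         return c
--     cs = counter(spanish_fruits)
--     cj = counter(japanese_fruits)
--     cb = counter(brazilian_fruits)
--     out = []
--     for i in popular_fruits:
--         out.extend([i] * (cs.get(i, 0) * cj.get(i, 0) * cb.get(i, 0)))
--     return out
-- ===== Notes on version B (the rewrite author's own statement) =====
-- stated objective: faster
-- what changed: Replaced the four nested scans with three hash counters built once, emitting each popular fruit repeated product-of-counts times.
import Mathlib
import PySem

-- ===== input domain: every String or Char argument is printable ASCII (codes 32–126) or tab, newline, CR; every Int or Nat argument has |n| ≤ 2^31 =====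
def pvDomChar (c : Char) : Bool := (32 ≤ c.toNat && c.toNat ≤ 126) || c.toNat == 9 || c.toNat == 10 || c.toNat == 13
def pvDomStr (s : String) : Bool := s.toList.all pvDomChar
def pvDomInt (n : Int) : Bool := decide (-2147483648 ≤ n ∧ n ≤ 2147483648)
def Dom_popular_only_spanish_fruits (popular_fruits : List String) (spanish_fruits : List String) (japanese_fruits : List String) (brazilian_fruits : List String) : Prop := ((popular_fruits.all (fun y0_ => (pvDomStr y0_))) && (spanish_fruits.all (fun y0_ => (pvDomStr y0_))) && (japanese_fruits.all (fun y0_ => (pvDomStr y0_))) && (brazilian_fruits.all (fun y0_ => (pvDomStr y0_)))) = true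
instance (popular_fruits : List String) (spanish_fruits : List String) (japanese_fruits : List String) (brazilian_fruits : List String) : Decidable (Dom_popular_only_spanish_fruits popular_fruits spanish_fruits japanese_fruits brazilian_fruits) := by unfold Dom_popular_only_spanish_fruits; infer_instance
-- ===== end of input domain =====

-- ===== PORT A =====
-- B replaces the four nested scans with three counters built once (asymptotically faster).
def popular_only_spanish_fruits (popular_fruits : List String) (spanish_fruits : List String) (japanese_fruits : List String) (brazilian_fruits : List String) : List String :=
  popular_fruits.foldl (fun acc i =>
    spanish_fruits.foldl (fun acc j =>
      japanese_fruits.foldl (fun acc k =>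
        brazilian_fruits.foldl (fun acc l =>
          if i == j && j == k && k == l then acc ++ [i] else acc) acc) acc) acc) []

-- ===== PORT B =====
-- counter(xs): the hand-written dict-counting loop of Source B
def pvCounter (xs : List String) : PySem.Dict String Int :=
  xs.foldl (fun c x => c.insert x (c.getD x 0 + 1)) PySem.Dict.empty

def popular_only_spanish_fruits_alt (popular_fruits : List String) (spanish_fruits : List String) (japanese_fruits : List String) (brazilian_fruits : List String) : List String :=
  let cs := pvCounter spanish_fruits
  let cj := pvCounter japanese_fruits
  let cb := pvCounter brazilian_fruits
  popular_fruits.foldl (fun out i =>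
    out ++ List.replicate ((cs.getD i 0 * cj.getD i 0 * cb.getD i 0)).toNat i) []

-- ===== PRECONDITION & SPEC =====
def Spec_popular_only_spanish_fruits (popular_fruits : List String) (spanish_fruits : List String) (japanese_fruits : List String) (brazilian_fruits : List String) (out : List String) : Prop := out = popular_only_spanish_fruits_alt popular_fruits spanish_fruits japanese_fruits brazilian_fruits
instance (popular_fruits : List String) (spanish_fruits : List String) (japanese_fruits : List String) (brazilian_fruits : List String) (out : List String) : Decidable (Spec_popular_only_spanish_fruits popular_fruits spanish_fruits japanese_fruits brazilian_fruits out) := by unfold Spec_popular_only_spanish_fruits; infer_instance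

-- ===== CLAIM (what is proved, stated in full; the proofs are below) =====
def Claim_equal_popular_only_spanish_fruits : Prop := ∀ (popular_fruits : List String) (spanish_fruits : List String) (japanese_fruits : List String) (brazilian_fruits : List String), Dom_popular_only_spanish_fruits popular_fruits spanish_fruits japanese_fruits brazilian_fruits → Spec_popular_only_spanish_fruits popular_fruits spanish_fruits japanese_fruits brazilian_fruits (popular_only_spanish_fruits popular_fruits spanish_fruits japanese_fruits brazilian_fruits)

-- ===== LEMMAS AND PROOFS =====

theorem pv_alt_def (p s jp br : List String) :
    popular_only_spanish_fruits_alt p s jp br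
      = p.foldl (fun out i =>
          out ++ List.replicate (((pvCounter s).getD i 0 * (pvCounter jp).getD i 0 * (pvCounter br).getD i 0)).toNat i) [] := rfl

theorem pv_app (acc : List String) (i : String) (a b c : Nat) (h : a + b = c) :
    acc ++ List.replicate a i ++ List.replicate b i = acc ++ List.replicate c i := by
  rw [List.append_assoc, List.replicate_append_replicate, h]

-- innermost loop: appends i once per element of br equal to k, provided c (= i==j && j==k)
theorem pv_inner (c : Bool) (i k : String) (br : List String) (acc : List String) :
    br.foldl (fun a l => if c && (k == l) then a ++ [i] else a) acc
      = acc ++ List.replicate (if c then br.count k else 0) i := by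
  induction br generalizing acc with
  | nil => cases c <;> simp
  | cons x xs ih =>
    cases c with
    | false => simp
    | true =>
      by_cases hk : k = x
      · subst hk
        simp only [List.foldl_cons, beq_self_eq_true, Bool.and_self]
        rw [ih]
        simp [List.count_cons_self, List.replicate_succ]
      · have hb : (k == x) = false := beq_eq_false_iff_ne.mpr hk
        have hb' : (x == k) = false := beq_eq_false_iff_ne.mpr (Ne.symm hk)
        simp only [List.foldl_cons, hb, Bool.and_false, if_neg Bool.false_ne_true]
        rw [ih]
        simp [List.count_cons, hb']

-- middle loop over japanese fruits
theorem pv_mid (i j : String) (jp br : List String) (acc : List String) :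
    jp.foldl (fun a k => br.foldl (fun a l => if i == j && (j == k) && (k == l) then a ++ [i] else a) a) acc
      = acc ++ List.replicate (if i = j then jp.count j * br.count j else 0) i := by
  induction jp generalizing acc with
  | nil => simp
  | cons x xs ih =>
    simp only [List.foldl_cons]
    rw [pv_inner (i == j && (j == x)) i x br acc, ih]
    by_cases hij : i = j
    · subst hij
      by_cases hx : i = x
      · subst hx
        rw [show (i == i && (i == i)) = true from by simp, if_pos rfl, if_pos rfl, if_pos rfl]
        exact pv_app acc i _ _ _ (by rw [List.count_cons_self]; ring)
      · have hb : (i == x) = false := beq_eq_false_iff_ne.mpr hx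
        have hb' : (x == i) = false := beq_eq_false_iff_ne.mpr (Ne.symm hx)
        simp [hb, hb', List.count_cons]
    · have hb : (i == j) = false := beq_eq_false_iff_ne.mpr hij
      simp [hb, hij]

-- outer loop over spanish fruits
theorem pv_outer (i : String) (s jp br : List String) (acc : List String) :
    s.foldl (fun a j => jp.foldl (fun a k => br.foldl (fun a l => if i == j && (j == k) && (k == l) then a ++ [i] else a) a) a) acc
      = acc ++ List.replicate (s.count i * (jp.count i * br.count i)) i := by
  induction s generalizing acc with
  | nil => simp
  | cons x xs ih =>
    simp only [List.foldl_cons]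
    rw [pv_mid i x jp br acc, ih]
    by_cases hx : i = x
    · subst hx
      rw [if_pos rfl]
      exact pv_app acc i _ _ _ (by rw [List.count_cons_self]; ring)
    · have hb' : (x == i) = false := beq_eq_false_iff_ne.mpr (Ne.symm hx)
      simp [hx, hb', List.count_cons]

-- the hand-written counting loop is PySem's counter, so getD gives the count
theorem pv_counter_getD (xs : List String) (v : String) :
    (pvCounter xs).getD v 0 = (xs.count v : Int) := by
  unfold pvCounter
  rw [PySem.Dict.foldl_insert_getD_add_one_eq_counter, PySem.Dict.getD_counter]

theorem pv_alt_step (s jp br : List String) (i : String) :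
    ((pvCounter s).getD i 0 * (pvCounter jp).getD i 0 * (pvCounter br).getD i 0).toNat
      = s.count i * (jp.count i * br.count i) := by
  rw [pv_counter_getD, pv_counter_getD, pv_counter_getD, ← Nat.cast_mul, ← Nat.cast_mul,
    Int.toNat_natCast, Nat.mul_assoc]

theorem pv_final (p s jp br : List String) :
    popular_only_spanish_fruits p s jp br = popular_only_spanish_fruits_alt p s jp br := by
  rw [pv_alt_def]
  unfold popular_only_spanish_fruits
  induction p using List.reverseRecOn with
  | nil => simp
  | append_singleton xs x ih =>
    simp only [List.foldl_append, List.foldl_cons, List.foldl_nil]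
    rw [pv_outer, pv_alt_step, ih]

-- ===== VERDICT (by name: the statement is the Claim_ definition above) =====
theorem popular_only_spanish_fruits_spec : Claim_equal_popular_only_spanish_fruits := by
  intro p s jp br _
  exact pv_final p s jp br
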